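-- pv_equiv track=rewrite | github.com/dimas-tri-sulaksono/xsis-assignment-2023 | BLQ/soal_8.py | nilai_minimal_maksimal_deret
-- ===== SOURCE A (Python) =====
-- def nilai_minimal_maksimal_deret(deret_angka):
--     if len(deret_angka) < 4:
--         return None  # Deret harus memiliki setidaknya 4 komponen untuk dijumlahkan
--
--     deret_angka.sort()  # Mengurutkan deret angka
--
--     minimal = float('inf')  # Inisialisasi dengan nilai tak terhingga
--     maksimal = float('-inf')  # Inisialisasi dengan nilai tak terhingga negatif
--
--     for i in range(len(deret_angka) - 3):
--         jumlah = deret_angka[i] + deret_angka[i+1] + deret_angka[i+2] + deret_angka[i+3]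
--         minimal = min(minimal, jumlah)
--         maksimal = max(maksimal, jumlah)
--
--     return minimal, maksimal
-- ===== SOURCE B (Python) =====
-- def nilai_minimal_maksimal_deret(deret_angka):
--     if len(deret_angka) < 4:
--         return None  # need at least 4 components
--
--     deret_angka.sort()  # in-place, same mutation as A
--
--     # sorted window sums are non-decreasing: min is the first window, max the last
--     return sum(deret_angka[:4]), sum(deret_angka[-4:])
-- ===== Notes on version B (the rewrite author's own statement) =====
-- stated objective: simpler
-- what changed: B drops A's window-scanning loop with inf/-inf accumulators: after the same in-place sort the window sums are non-decreasing, so B returns (sum of first 4, sum of last 4) directly (O(1) after the sort; measured ~2x faster overall).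
import Mathlib
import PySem

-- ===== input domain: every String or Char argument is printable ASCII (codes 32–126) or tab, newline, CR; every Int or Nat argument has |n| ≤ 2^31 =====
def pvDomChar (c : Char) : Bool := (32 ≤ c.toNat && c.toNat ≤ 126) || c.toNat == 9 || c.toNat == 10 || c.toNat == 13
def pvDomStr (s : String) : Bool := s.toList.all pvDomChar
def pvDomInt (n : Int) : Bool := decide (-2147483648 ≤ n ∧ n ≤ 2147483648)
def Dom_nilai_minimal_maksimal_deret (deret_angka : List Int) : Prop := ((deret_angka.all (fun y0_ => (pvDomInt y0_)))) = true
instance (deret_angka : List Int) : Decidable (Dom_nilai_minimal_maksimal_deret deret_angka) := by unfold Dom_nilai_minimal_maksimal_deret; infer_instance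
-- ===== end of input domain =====

-- B replaces A's window-scanning loop by the closed form (sum of first 4, sum of last 4)
-- of the sorted list: simpler. Both A and B sort the argument in place in Python; the
-- equivalence proved here is about the RETURN value (the in-place sort is identical anyway).

-- ===== PORT A =====
-- float('inf') / float('-inf') sentinels are modelled as `none` (min/max with none = the other arg);
-- the loop runs at least once when length ≥ 4, so the state is (some _, some _) at the end.
def nilai_minimal_maksimal_deret (deret_angka : List Int) : Option (Int × Int) :=
  if deret_angka.length < 4 then none
  else
    let s := PySem.List.sorted deret_angka (fun x => x) false
    let res := (PySem.List.pyRange 0 ((s.length : Int) - 3) 1).foldl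
      (fun (st : Option Int × Option Int) i =>
        let jumlah := PySem.List.pyGetD s i 0 + PySem.List.pyGetD s (i+1) 0
          + PySem.List.pyGetD s (i+2) 0 + PySem.List.pyGetD s (i+3) 0
        (some (match st.1 with | none => jumlah | some m => min m jumlah),
         some (match st.2 with | none => jumlah | some m => max m jumlah)))
      ((none, none) : Option Int × Option Int)
    match res with
    | (some mn, some mx) => some (mn, mx)
    | _ => none   -- unreachable: length ≥ 4 means the loop body ran

-- ===== PORT B =====
def nilai_minimal_maksimal_deret_alt (deret_angka : List Int) : Option (Int × Int) :=
  if deret_angka.length < 4 then none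
  else
    let s := PySem.List.sorted deret_angka (fun x => x) false
    some ((PySem.List.slice s none (some 4)).sum, (PySem.List.slice s (some (-4)) none).sum)

-- ===== PRECONDITION & SPEC =====
def Spec_nilai_minimal_maksimal_deret (deret_angka : List Int) (out : Option (Int × Int)) : Prop := out = nilai_minimal_maksimal_deret_alt deret_angka
instance (deret_angka : List Int) (out : Option (Int × Int)) : Decidable (Spec_nilai_minimal_maksimal_deret deret_angka out) := by unfold Spec_nilai_minimal_maksimal_deret; infer_instance

-- ===== CLAIM (what is proved, stated in full; the proofs are below) =====
def Claim_equal_nilai_minimal_maksimal_deret : Prop := ∀ (deret_angka : List Int), Dom_nilai_minimal_maksimal_deret deret_angka → Spec_nilai_minimal_maksimal_deret deret_angka (nilai_minimal_maksimal_deret deret_angka)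

-- ===== LEMMAS AND PROOFS =====

-- window sum starting at index k
def pvWin (s : List Int) (k : Nat) : Int :=
  s.getD k 0 + s.getD (k+1) 0 + s.getD (k+2) 0 + s.getD (k+3) 0

theorem pvGetD_mono {s : List Int} (hs : List.Pairwise (· ≤ ·) s)
    {i j : Nat} (hij : i ≤ j) (hj : j < s.length) : s.getD i 0 ≤ s.getD j 0 := by
  rcases Nat.lt_or_eq_of_le hij with h | h
  · rw [List.getD_eq_getElem s 0 (lt_of_le_of_lt hij hj), List.getD_eq_getElem s 0 hj]
    exact List.pairwise_iff_getElem.mp hs i j _ _ h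
  · subst h; rfl

theorem pvWin_mono {s : List Int} (hs : List.Pairwise (· ≤ ·) s)
    {i j : Nat} (hij : i ≤ j) (hj : j + 3 < s.length) : pvWin s i ≤ pvWin s j := by
  unfold pvWin
  have h0 := pvGetD_mono hs (Nat.add_le_add_right hij 0) (by omega)
  have h1 := pvGetD_mono hs (Nat.add_le_add_right hij 1) (by omega)
  have h2 := pvGetD_mono hs (Nat.add_le_add_right hij 2) (by omega)
  have h3 := pvGetD_mono hs (Nat.add_le_add_right hij 3) hj
  simp only [Nat.add_zero] at h0
  omega

-- the state transition of A's loop, re-indexed over Nat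
def pvStep (s : List Int) (st : Option Int × Option Int) (k : Nat) : Option Int × Option Int :=
  (some (match st.1 with | none => pvWin s k | some m => min m (pvWin s k)),
   some (match st.2 with | none => pvWin s k | some m => max m (pvWin s k)))

theorem pvFold_inv (s : List Int) (hs : List.Pairwise (· ≤ ·) s)
    (m : Nat) (h1 : 1 ≤ m) (h2 : m + 3 ≤ s.length) :
    (List.range m).foldl (pvStep s) (none, none) = (some (pvWin s 0), some (pvWin s (m-1))) := by
  induction m with
  | zero => omega
  | succ m ih =>
    rcases Nat.eq_or_lt_of_le h1 with h | h
    · simp [← h, pvStep]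
    · have hm1 : 1 ≤ m := by omega
      rw [List.range_succ, List.foldl_append, ih hm1 (by omega)]
      have hmin : min (pvWin s 0) (pvWin s m) = pvWin s 0 :=
        min_eq_left (pvWin_mono hs (Nat.zero_le m) (by omega))
      have hmax : max (pvWin s (m-1)) (pvWin s m) = pvWin s m :=
        max_eq_right (pvWin_mono hs (by omega) (by omega))
      simp [pvStep, hmin, hmax]

-- A's Int-indexed loop body coincides with pvStep after the range is cast to Nat
theorem pvFold_cast (s : List Int) (m : Nat) :
    (PySem.List.pyRange 0 (m : Int) 1).foldl
      (fun (st : Option Int × Option Int) i =>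
        (some (match st.1 with
               | none => PySem.List.pyGetD s i 0 + PySem.List.pyGetD s (i+1) 0
                   + PySem.List.pyGetD s (i+2) 0 + PySem.List.pyGetD s (i+3) 0
               | some m => min m (PySem.List.pyGetD s i 0 + PySem.List.pyGetD s (i+1) 0
                   + PySem.List.pyGetD s (i+2) 0 + PySem.List.pyGetD s (i+3) 0)),
         some (match st.2 with
               | none => PySem.List.pyGetD s i 0 + PySem.List.pyGetD s (i+1) 0
                   + PySem.List.pyGetD s (i+2) 0 + PySem.List.pyGetD s (i+3) 0
               | some m => max m (PySem.List.pyGetD s i 0 + PySem.List.pyGetD s (i+1) 0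
                   + PySem.List.pyGetD s (i+2) 0 + PySem.List.pyGetD s (i+3) 0))))
      (none, none)
    = (List.range m).foldl (pvStep s) (none, none) := by
  rw [PySem.List.pyRange_zero_natCast, List.foldl_map]
  have hf : ∀ (st : Option Int × Option Int) (k : Nat),
      ((some (match st.1 with
               | none => PySem.List.pyGetD s (k:Int) 0 + PySem.List.pyGetD s ((k:Int)+1) 0
                   + PySem.List.pyGetD s ((k:Int)+2) 0 + PySem.List.pyGetD s ((k:Int)+3) 0
               | some m => min m (PySem.List.pyGetD s (k:Int) 0 + PySem.List.pyGetD s ((k:Int)+1) 0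
                   + PySem.List.pyGetD s ((k:Int)+2) 0 + PySem.List.pyGetD s ((k:Int)+3) 0)),
         some (match st.2 with
               | none => PySem.List.pyGetD s (k:Int) 0 + PySem.List.pyGetD s ((k:Int)+1) 0
                   + PySem.List.pyGetD s ((k:Int)+2) 0 + PySem.List.pyGetD s ((k:Int)+3) 0
               | some m => max m (PySem.List.pyGetD s (k:Int) 0 + PySem.List.pyGetD s ((k:Int)+1) 0
                   + PySem.List.pyGetD s ((k:Int)+2) 0 + PySem.List.pyGetD s ((k:Int)+3) 0))) : Option Int × Option Int)
      = pvStep s st k := by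
    intro st k
    have e1 : (k : Int) + 1 = ((k+1 : Nat) : Int) := by push_cast; ring
    have e2 : (k : Int) + 2 = ((k+2 : Nat) : Int) := by push_cast; ring
    have e3 : (k : Int) + 3 = ((k+3 : Nat) : Int) := by push_cast; ring
    simp only [e1, e2, e3, PySem.List.pyGetD_natCast, pvStep, pvWin]
  simp only [hf]

theorem pvSum_take4 (s : List Int) (h : 4 ≤ s.length) :
    (s.take 4).sum = pvWin s 0 := by
  match s, h with
  | a :: b :: c :: d :: t, _ => simp [pvWin]; ring

theorem pvSum_last4 (s : List Int) (h : 4 ≤ s.length) :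
    (s.drop (s.length - 4)).sum = pvWin s (s.length - 4) := by
  have hlen : (s.drop (s.length - 4)).length = 4 := by simp; omega
  have htake : s.drop (s.length - 4) = (s.drop (s.length - 4)).take 4 := by
    rw [List.take_of_length_le (by omega)]
  have := pvSum_take4 (s.drop (s.length - 4)) (by omega)
  rw [htake, this]
  unfold pvWin
  have hgd : ∀ i : Nat, i < 4 → (s.drop (s.length - 4)).getD i 0 = s.getD (s.length - 4 + i) 0 := by
    intro i hi
    rw [List.getD_eq_getElem _ 0 (by omega), List.getD_eq_getElem _ 0 (by omega)]
    exact List.getElem_drop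
  rw [hgd 0 (by omega), hgd 1 (by omega), hgd 2 (by omega), hgd 3 (by omega)]
  simp

-- ===== VERDICT (by name: the statement is the Claim_ definition above) =====
theorem nilai_minimal_maksimal_deret_spec : Claim_equal_nilai_minimal_maksimal_deret := by
  intro l _
  unfold Spec_nilai_minimal_maksimal_deret nilai_minimal_maksimal_deret nilai_minimal_maksimal_deret_alt
  by_cases hl : l.length < 4
  · simp [hl]
  · simp only [hl, if_false]
    set s := PySem.List.sorted l (fun x => x) false with hsdef
    have hslen : s.length = l.length := PySem.List.length_sorted l _ _
    have h4 : 4 ≤ s.length := by omega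
    have hs : List.Pairwise (· ≤ ·) s := PySem.List.sorted_pairwise l (fun x => x)
    have hcast : ((s.length : Int) - 3) = ((s.length - 3 : Nat) : Int) := by omega
    rw [hcast, pvFold_cast s (s.length - 3)]
    rw [pvFold_inv s hs (s.length - 3) (by omega) (by omega)]
    rw [PySem.List.slice_to s (by norm_num : (0:Int) ≤ 4),
        PySem.List.slice_from_neg_ofNat s 4 (by norm_num)]
    have h43 : s.length - 3 - 1 = s.length - 4 := by omega
    rw [h43]
    have ht : (4 : Int).toNat = 4 := rfl
    norm_num [ht, pvSum_take4 s h4, pvSum_last4 s h4]
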